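-- pv_equiv track=rewrite | github.com/yuriak/QASystem | PreProcess.py | lookup_answer_index
-- ===== SOURCE A (Python) =====
-- def lookup_answer_index(answer_tokens, doc_tokens):
--     doc_length = len(doc_tokens)
--     answer_length = len(answer_tokens)
--     for i in range(doc_length):
--         if doc_length - i < answer_length:
--             return (0, 0)
--         found = True
--         for j in range(answer_length):
--             found = answer_tokens[j].lower() == doc_tokens[i + j].lower()
--             if not found: break
--         if found:
--             return (i, i + answer_length - 1)
--     return (0, 0)
-- ===== SOURCE B (Python) =====
-- def lookup_answer_index(answer_tokens, doc_tokens):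
--     # Rabin-Karp: lowercase every token once, hash tokens to ints, slide a
--     # rolling window hash over the doc and verify token-equality on hash hits.
--     MOD = 1000000007
--     BASE = 1048583
--
--     def token_hash(t):
--         h = 0
--         for c in t:
--             h = (h * 257 + ord(c)) % MOD
--         return h
--
--     def seq_hash(vs):
--         h = 0
--         for v in vs:
--             h = (h * BASE + v) % MOD
--         return h
--
--     pat = [t.lower() for t in answer_tokens]
--     doc = [t.lower() for t in doc_tokens]
--     m = len(pat)
--     n = len(doc)
--     if n < m:
--         return (0, 0)
--     dh = [token_hash(t) for t in doc]
--     hp = seq_hash([token_hash(t) for t in pat])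
--     hw = seq_hash(dh[:m])
--     pw = pow(BASE, m - 1, MOD) if m > 0 else 1
--     i = 0
--     while True:
--         if hw == hp and doc[i:i + m] == pat:
--             return (i, i + m - 1)
--         if n <= i + m:
--             return (0, 0)
--         hw = ((hw - dh[i] * pw) * BASE + dh[i + m]) % MOD
--         i += 1
-- ===== Notes on version B (the rewrite author's own statement) =====
-- stated objective: alternative
-- what changed: Replaces A's naive scan (re-lowercasing tokens at every window position) by Rabin-Karp: lowercase and hash every token once, slide a rolling polynomial window hash over the doc, and compare tokens only on hash hits.
-- intended difference: On answer_tokens=[] with doc_tokens=[], A returns (0,0) while B returns (0,-1), the same 'empty pattern matches at position 0' value A itself returns for an empty answer on every nonempty doc, so B's value is the consistent, intended one. — e.g. on lookup_answer_index([], []): A returns [0, 0], B returns [0, -1]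
import Mathlib
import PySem

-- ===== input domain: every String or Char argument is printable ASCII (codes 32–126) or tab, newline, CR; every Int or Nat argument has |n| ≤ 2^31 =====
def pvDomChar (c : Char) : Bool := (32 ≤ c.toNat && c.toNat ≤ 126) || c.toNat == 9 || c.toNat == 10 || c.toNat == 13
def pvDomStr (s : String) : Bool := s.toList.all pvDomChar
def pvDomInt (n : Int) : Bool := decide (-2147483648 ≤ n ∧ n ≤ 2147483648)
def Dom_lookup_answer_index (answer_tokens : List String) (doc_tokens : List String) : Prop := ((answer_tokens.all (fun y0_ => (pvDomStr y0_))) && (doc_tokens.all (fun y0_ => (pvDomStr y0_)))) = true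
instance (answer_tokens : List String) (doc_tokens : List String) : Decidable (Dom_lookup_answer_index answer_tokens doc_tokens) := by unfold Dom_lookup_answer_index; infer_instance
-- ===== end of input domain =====

-- B replaces A's naive re-lowercasing window scan by Rabin-Karp (lowercase once,
-- rolling window hash, verify on hash hits); equivalence is about the return value.

-- ===== PORT A =====
-- found = answer_tokens[j].lower() == doc_tokens[i+j].lower()  (indices provably in range)
def pvLowEq (a b : String) : Bool := PySem.Str.lower a == PySem.Str.lower b

-- inner 'for j in range(answer_length)' with the 'found' variable and break
def pvInnerA (ans doc : List String) (i j m : Nat) (found : Bool) : Bool :=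
  if _h : j < m then
    let f := pvLowEq (ans.getD j "") (doc.getD (i + j) "")
    if !f then f else pvInnerA ans doc i (j + 1) m f
  else found
termination_by m - j

-- outer 'for i in range(doc_length)' with its two early returns
def pvOuterA (ans doc : List String) (i : Nat) : List Int :=
  if _h : i < doc.length then
    if ((doc.length : Int) - (i : Int) < (ans.length : Int)) then [0, 0]
    else
      let found := pvInnerA ans doc i 0 ans.length true
      if found then [(i : Int), (i : Int) + (ans.length : Int) - 1]
      else pvOuterA ans doc (i + 1)
  else [0, 0]
termination_by doc.length - i

def lookup_answer_index (answer_tokens : List String) (doc_tokens : List String) : List Int :=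
  pvOuterA answer_tokens doc_tokens 0

-- ===== PORT B =====
def pvMOD : Int := 1000000007
def pvBASE : Int := 1048583

def pvTokenHash (t : String) : Int :=
  t.toList.foldl (fun h c => PySem.Int.mod (h * 257 + (c.toNat : Int)) pvMOD) 0

def pvSeqHash (vs : List Int) : Int :=
  vs.foldl (fun h v => PySem.Int.mod (h * pvBASE + v) pvMOD) 0

-- 'while True' rolling-hash loop; doc[i:i+m] is the slice, dh[i]/dh[i+m] are in range
def pvRollB (pat doc : List String) (dh : List Int) (hp pw : Int) (m n : Nat) (hw : Int) (i : Nat) : List Int :=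
  if hw = hp ∧ PySem.List.slice doc (some (i : Int)) (some ((i : Int) + (m : Int))) = pat then
    [(i : Int), (i : Int) + (m : Int) - 1]
  else if _h : n ≤ i + m then [0, 0]
  else pvRollB pat doc dh hp pw m n
        (PySem.Int.mod ((hw - dh.getD i 0 * pw) * pvBASE + dh.getD (i + m) 0) pvMOD) (i + 1)
termination_by n - i

def lookup_answer_index_alt (answer_tokens : List String) (doc_tokens : List String) : List Int :=
  let pat := answer_tokens.map PySem.Str.lower
  let doc := doc_tokens.map PySem.Str.lower
  let m := pat.length
  let n := doc.length
  if n < m then [0, 0]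
  else
    let dh := doc.map pvTokenHash
    let hp := pvSeqHash (pat.map pvTokenHash)
    let hw := pvSeqHash (dh.take m)          -- dh[:m]
    let pw := if 0 < m then PySem.Int.mod (pvBASE ^ (m - 1)) pvMOD else 1   -- pow(BASE, m-1, MOD)
    pvRollB pat doc dh hp pw m n hw 0

-- ===== PRECONDITION & SPEC =====
-- On answer_tokens = [] with doc_tokens = [], A returns [0,0] while B returns [0,-1],
-- which matches A's own [0,-1] for an empty answer on every nonempty doc — the
-- consistent "empty pattern matches at position 0" value, so B's is the intended one.
def D_lookup_answer_index (answer_tokens : List String) (doc_tokens : List String) : Prop :=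
  answer_tokens = [] ∧ doc_tokens = []
instance (answer_tokens : List String) (doc_tokens : List String) : Decidable (D_lookup_answer_index answer_tokens doc_tokens) := by unfold D_lookup_answer_index; infer_instance

def Spec_lookup_answer_index (answer_tokens : List String) (doc_tokens : List String) (out : List Int) : Prop := ¬ D_lookup_answer_index answer_tokens doc_tokens → out = lookup_answer_index_alt answer_tokens doc_tokens
instance (answer_tokens : List String) (doc_tokens : List String) (out : List Int) : Decidable (Spec_lookup_answer_index answer_tokens doc_tokens out) := by unfold Spec_lookup_answer_index; infer_instance

def pvDiffWitness_lookup_answer_index : List String × List String := ([], [])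
def pvDiffWitnessOut_lookup_answer_index : (List Int) × (List Int) := ([0, 0], [0, -1])

-- ===== CLAIM (what is proved, stated in full; the proofs are below) =====
def Claim_unchanged_lookup_answer_index : Prop := ∀ (answer_tokens : List String) (doc_tokens : List String), Dom_lookup_answer_index answer_tokens doc_tokens → Spec_lookup_answer_index answer_tokens doc_tokens (lookup_answer_index answer_tokens doc_tokens)
def Claim_changed_lookup_answer_index : Prop := Dom_lookup_answer_index (pvDiffWitness_lookup_answer_index.1) (pvDiffWitness_lookup_answer_index.2) ∧ D_lookup_answer_index (pvDiffWitness_lookup_answer_index.1) (pvDiffWitness_lookup_answer_index.2) ∧ lookup_answer_index (pvDiffWitness_lookup_answer_index.1) (pvDiffWitness_lookup_answer_index.2) = pvDiffWitnessOut_lookup_answer_index.1 ∧ lookup_answer_index_alt (pvDiffWitness_lookup_answer_index.1) (pvDiffWitness_lookup_answer_index.2) = pvDiffWitnessOut_lookup_answer_index.2 ∧ pvDiffWitnessOut_lookup_answer_index.1 ≠ pvDiffWitnessOut_lookup_answer_index.2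
def Claim_exact_lookup_answer_index : Prop := ∀ (answer_tokens : List String) (doc_tokens : List String), Dom_lookup_answer_index answer_tokens doc_tokens → D_lookup_answer_index answer_tokens doc_tokens → lookup_answer_index answer_tokens doc_tokens ≠ lookup_answer_index_alt answer_tokens doc_tokens

-- ===== LEMMAS AND PROOFS =====

-- reference first-match scan over the lowered lists
def pvFirst (lp ld : List String) (i : Nat) : List Int :=
  if ld.length < i + lp.length then [0, 0]
  else if (ld.drop i).take lp.length = lp then [(i : Int), (i : Int) + (lp.length : Int) - 1]
  else pvFirst lp ld (i + 1)
termination_by ld.length + 1 - i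
decreasing_by omega

theorem innerA_spec (ans doc : List String) (i : Nat) :
    ∀ fuel j, ans.length - j ≤ fuel →
    pvInnerA ans doc i j ans.length true =
      decide (∀ k, j ≤ k → k < ans.length →
        PySem.Str.lower (ans.getD k "") = PySem.Str.lower (doc.getD (i + k) "")) := by
  intro fuel
  induction fuel with
  | zero =>
    intro j hj
    rw [pvInnerA]
    have : ¬ j < ans.length := by omega
    simp only [this, dif_neg, not_false_iff]
    symm; rw [decide_eq_true_iff]
    intro k hk1 hk2; omega
  | succ fuel ih =>
    intro j hj
    rw [pvInnerA]
    by_cases hjm : j < ans.length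
    · simp only [hjm, dif_pos]
      by_cases hf : PySem.Str.lower (ans.getD j "") = PySem.Str.lower (doc.getD (i + j) "")
      · have hb : pvLowEq (ans.getD j "") (doc.getD (i + j) "") = true := by
          simp only [pvLowEq, beq_iff_eq]; exact hf
        simp only [hb, Bool.not_true, if_false, Bool.false_eq_true]
        rw [ih (j + 1) (by omega)]
        rw [decide_eq_decide]
        constructor
        · intro h k hk1 hk2
          rcases Nat.eq_or_lt_of_le hk1 with h1 | h1
          · subst h1; exact hf
          · exact h k h1 hk2
        · intro h k hk1 hk2; exact h k (by omega) hk2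
      · have hb : pvLowEq (ans.getD j "") (doc.getD (i + j) "") = false := by
          simp only [pvLowEq, beq_eq_false_iff_ne, ne_eq]; exact hf
        simp only [hb, Bool.not_false, if_true]
        symm; rw [decide_eq_false_iff_not]
        intro h; exact hf (h j (le_refl j) hjm)
    · simp only [hjm, dif_neg, not_false_iff]
      symm; rw [decide_eq_true_iff]
      intro k hk1 hk2; omega

theorem window_iff (ans doc : List String) (i : Nat) (h : i + ans.length ≤ doc.length) :
    (∀ k, 0 ≤ k → k < ans.length →
        PySem.Str.lower (ans.getD k "") = PySem.Str.lower (doc.getD (i + k) "")) ↔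
      ((doc.map PySem.Str.lower).drop i).take ans.length = ans.map PySem.Str.lower := by
  constructor
  · intro hall
    apply List.ext_getElem
    · simp; omega
    · intro k h1 h2
      have hk : k < ans.length := by simpa using h2
      have hd : i + k < doc.length := by omega
      simp only [List.getElem_take, List.getElem_drop, List.getElem_map]
      have := hall k (Nat.zero_le k) hk
      rw [List.getD_eq_getElem?_getD, List.getD_eq_getElem?_getD,
          List.getElem?_eq_getElem hk, List.getElem?_eq_getElem hd] at this
      simpa using this.symm
  · intro heq k _ hk
    have hd : i + k < doc.length := by omega
    have h2 : k < (((doc.map PySem.Str.lower).drop i).take ans.length).length := by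
      simp; omega
    have := congrArg (fun l => l[k]?) heq
    simp only [List.getElem?_eq_getElem h2, List.getElem?_eq_getElem (by simpa using hk : k < (ans.map PySem.Str.lower).length)] at this
    simp only [List.getElem_take, List.getElem_drop, List.getElem_map, Option.some.injEq] at this
    rw [List.getD_eq_getElem?_getD, List.getD_eq_getElem?_getD,
        List.getElem?_eq_getElem hk, List.getElem?_eq_getElem hd]
    simpa using this.symm

theorem outerA_eq (ans doc : List String) (hm : 1 ≤ ans.length) :
    ∀ fuel i, doc.length + 1 - i ≤ fuel →
    pvOuterA ans doc i = pvFirst (ans.map PySem.Str.lower) (doc.map PySem.Str.lower) i := by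
  intro fuel
  induction fuel with
  | zero =>
    intro i hi
    rw [pvOuterA, pvFirst]
    simp only [List.length_map]
    have h1 : ¬ i < doc.length := by omega
    have h3 : doc.length < i + ans.length := by omega
    simp only [h1, dif_neg, not_false_iff, h3, if_pos]
  | succ fuel ih =>
    intro i hi
    rw [pvOuterA, pvFirst]
    simp only [List.length_map]
    by_cases h1 : i < doc.length
    · by_cases h2 : ((doc.length : Int) - (i : Int) < (ans.length : Int))
      · have h3 : doc.length < i + ans.length := by omega
        simp only [h1, dif_pos, h2, if_pos, h3]
      · have h3 : ¬ doc.length < i + ans.length := by omega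
        have h4 : i + ans.length ≤ doc.length := by omega
        simp only [h1, dif_pos, h2, h3, if_false]
        rw [innerA_spec ans doc i ans.length 0 (by omega)]
        by_cases h6 : (∀ k, 0 ≤ k → k < ans.length →
            PySem.Str.lower (ans.getD k "") = PySem.Str.lower (doc.getD (i + k) ""))
        · have h5 := (window_iff ans doc i h4).mp h6
          rw [decide_eq_true h6, if_pos h5]
          simp
        · have h5 : ¬ ((doc.map PySem.Str.lower).drop i).take ans.length = ans.map PySem.Str.lower :=
            fun h => h6 ((window_iff ans doc i h4).mpr h)
          rw [decide_eq_false h6, if_neg h5]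
          simp only [Bool.false_eq_true, if_false]
          exact ih (i + 1) (by omega)
    · have h3 : doc.length < i + ans.length := by omega
      simp only [h1, dif_neg, not_false_iff, h3, if_pos]

def pvStep (a v : Int) : Int := a * pvBASE + v
def pvPolyFrom (vs : List Int) (a : Int) : Int := vs.foldl pvStep a
def pvPoly (vs : List Int) : Int := pvPolyFrom vs 0

theorem pvMOD_pos : (0 : Int) < pvMOD := by norm_num [pvMOD]

theorem pymod_eq (a : Int) : PySem.Int.mod a pvMOD = a % pvMOD :=
  PySem.Int.mod_eq_emod_of_pos pvMOD_pos

theorem seqHash_eq_poly (vs : List Int) : ∀ a,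
    vs.foldl (fun h v => PySem.Int.mod (h * pvBASE + v) pvMOD) (PySem.Int.mod a pvMOD)
      = pvPolyFrom vs a % pvMOD := by
  induction vs with
  | nil => intro a; simp [pvPolyFrom, pymod_eq]
  | cons v vs ih =>
    intro a
    simp only [List.foldl_cons, pvPolyFrom, pvStep]
    have h1 : PySem.Int.mod (PySem.Int.mod a pvMOD * pvBASE + v) pvMOD
        = PySem.Int.mod (a * pvBASE + v) pvMOD := by
      rw [pymod_eq, pymod_eq, pymod_eq]
      have : a % pvMOD ≡ a [ZMOD pvMOD] := Int.emod_emod_of_dvd a dvd_rfl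
      exact (this.mul_right pvBASE).add_right v
    rw [h1, ih (a * pvBASE + v)]
    rfl

theorem seqHash_eq (vs : List Int) : pvSeqHash vs = pvPoly vs % pvMOD := by
  have h0 : (0 : Int) = PySem.Int.mod 0 pvMOD := by rw [pymod_eq]; simp
  rw [pvSeqHash, h0, seqHash_eq_poly vs 0]; rfl

theorem polyFrom_eq (vs : List Int) : ∀ a, pvPolyFrom vs a = a * pvBASE ^ vs.length + pvPoly vs := by
  induction vs with
  | nil => intro a; simp [pvPolyFrom, pvPoly]
  | cons v vs ih =>
    intro a
    simp only [pvPolyFrom, pvPoly, List.foldl_cons] at *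
    rw [show pvStep 0 v = v from by simp [pvStep], show pvStep a v = a * pvBASE + v from rfl]
    rw [ih (a * pvBASE + v), ih v]
    simp only [List.length_cons]
    ring

theorem roll_step (x y : Int) (t : List Int) :
    PySem.Int.mod ((pvSeqHash (x :: t) - x * PySem.Int.mod (pvBASE ^ t.length) pvMOD) * pvBASE + y) pvMOD
      = pvSeqHash (t ++ [y]) := by
  rw [seqHash_eq, seqHash_eq, pymod_eq, pymod_eq]
  have hpoly1 : pvPoly (x :: t) = x * pvBASE ^ t.length + pvPoly t := by
    have : pvPoly (x :: t) = pvPolyFrom t x := by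
      simp [pvPoly, pvPolyFrom, pvStep]
    rw [this, polyFrom_eq]
  have hpoly2 : pvPoly (t ++ [y]) = pvPoly t * pvBASE + y := by
    simp [pvPoly, pvPolyFrom, List.foldl_append, pvStep]
  rw [hpoly1, hpoly2]
  have e1 : (x * pvBASE ^ t.length + pvPoly t) % pvMOD ≡ x * pvBASE ^ t.length + pvPoly t [ZMOD pvMOD] :=
    Int.emod_emod_of_dvd _ dvd_rfl
  have e2 : pvBASE ^ t.length % pvMOD ≡ pvBASE ^ t.length [ZMOD pvMOD] :=
    Int.emod_emod_of_dvd _ dvd_rfl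
  have e3 : ((x * pvBASE ^ t.length + pvPoly t) % pvMOD - x * (pvBASE ^ t.length % pvMOD)) * pvBASE + y
      ≡ ((x * pvBASE ^ t.length + pvPoly t) - x * pvBASE ^ t.length) * pvBASE + y [ZMOD pvMOD] :=
    ((e1.sub (e2.mul_left x)).mul_right pvBASE).add_right y
  have e4 : ((x * pvBASE ^ t.length + pvPoly t) - x * pvBASE ^ t.length) * pvBASE + y
      = pvPoly t * pvBASE + y := by ring
  rw [← e4]
  exact e3

theorem rollB_eq (lp ld : List String) (hm : 1 ≤ lp.length) :
    ∀ fuel i, ld.length - i ≤ fuel → i + lp.length ≤ ld.length →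
    pvRollB lp ld (ld.map pvTokenHash) (pvSeqHash (lp.map pvTokenHash))
        (PySem.Int.mod (pvBASE ^ (lp.length - 1)) pvMOD) lp.length ld.length
        (pvSeqHash (((ld.map pvTokenHash).drop i).take lp.length)) i
      = pvFirst lp ld i := by
  intro fuel
  induction fuel with
  | zero => intro i h1 h2; omega
  | succ fuel ih =>
    intro i h1 h2
    rw [pvRollB, pvFirst]
    have h3 : ¬ ld.length < i + lp.length := by omega
    rw [if_neg h3]
    rw [PySem.List.slice_natCast_add]
    by_cases hwin : (ld.drop i).take lp.length = lp
    · have hdh : ((ld.map pvTokenHash).drop i).take lp.length = lp.map pvTokenHash := by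
        rw [← List.map_drop, ← List.map_take, hwin]
      rw [if_pos ⟨congrArg pvSeqHash hdh, hwin⟩, if_pos hwin]
    · rw [if_neg (fun hc => hwin hc.2), if_neg hwin]
      by_cases h4 : ld.length ≤ i + lp.length
      · rw [dif_pos h4, pvFirst, if_pos (by omega)]
      · rw [dif_neg h4]
        have hi : i < (ld.map pvTokenHash).length := by simp; omega
        have him : i + lp.length < (ld.map pvTokenHash).length := by simp; omega
        set dh := ld.map pvTokenHash with hdhdef
        set t : List Int := (dh.drop (i + 1)).take (lp.length - 1) with ht
        have htlen : t.length = lp.length - 1 := by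
          simp [ht, hdhdef]; omega
        have lemA : (dh.drop i).take lp.length = dh[i] :: t := by
          rw [List.drop_eq_getElem_cons hi]
          rw [show lp.length = (lp.length - 1) + 1 by omega]
          rw [List.take_succ_cons]
        have lemB : (dh.drop (i + 1)).take lp.length = t ++ [dh[i + lp.length]] := by
          conv_lhs => rw [show lp.length = (lp.length - 1) + 1 by omega, List.take_add_one]
          congr 1
          rw [List.getElem?_drop, show i + 1 + (lp.length - 1) = i + lp.length from by omega,
              List.getElem?_eq_getElem him]
          rfl
        have hgd1 : dh.getD i 0 = dh[i] := List.getD_eq_getElem dh 0 hi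
        have hgd2 : dh.getD (i + lp.length) 0 = dh[i + lp.length] := List.getD_eq_getElem dh 0 him
        rw [lemA, hgd1, hgd2]
        have hrs := roll_step dh[i] dh[i + lp.length] t
        rw [htlen] at hrs
        rw [hrs, ← lemB]
        exact ih (i + 1) (by omega) (by omega)


theorem altB_empty_pat (doc : List String) : lookup_answer_index_alt [] doc = [0, -1] := by
  simp only [lookup_answer_index_alt, List.map_nil, List.length_nil, Nat.lt_irrefl, if_false,
    List.take_zero, Nat.not_lt_zero]
  rw [pvRollB]
  rw [if_pos ?_]
  · norm_num
  · constructor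
    · simp [pvSeqHash]
    · simpa using PySem.List.slice_natCast_add (doc.map PySem.Str.lower) 0 0

theorem main_eq (ans doc : List String) (hD : ¬ D_lookup_answer_index ans doc) :
    lookup_answer_index ans doc = lookup_answer_index_alt ans doc := by
  rcases ans with _ | ⟨a, as⟩
  · -- empty answer, doc ≠ []
    rcases doc with _ | ⟨d, ds⟩
    · exact absurd ⟨rfl, rfl⟩ hD
    · rw [altB_empty_pat, lookup_answer_index, pvOuterA]
      rw [dif_pos (by simp)]
      rw [if_neg (by simp; omega)]
      rw [pvInnerA]
      norm_num
  · set ans := a :: as with hans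
    have hm : 1 ≤ ans.length := by simp [hans]
    by_cases hnm : doc.length < ans.length
    · -- answer longer than doc: both [0, 0]
      have hA : lookup_answer_index ans doc = [0, 0] := by
        rw [lookup_answer_index, pvOuterA]
        by_cases h0 : 0 < doc.length
        · rw [dif_pos h0, if_pos (by push_cast; omega)]
        · rw [dif_neg h0]
      have hB : lookup_answer_index_alt ans doc = [0, 0] := by
        simp only [lookup_answer_index_alt, List.length_map]
        rw [if_pos hnm]
      rw [hA, hB]
    · -- 1 ≤ m ≤ n : both equal pvFirst over the lowered lists
      push Not at hnm
      rw [lookup_answer_index,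
        outerA_eq ans doc hm (doc.length + 1) 0 (by omega)]
      simp only [lookup_answer_index_alt, List.length_map]
      rw [if_neg (by omega), if_pos (by omega)]
      rw [← rollB_eq (ans.map PySem.Str.lower) (doc.map PySem.Str.lower)
            (by simpa using hm) doc.length 0 (by simp) (by simp; omega)]
      simp

-- ===== VERDICT (by name: the statement is the Claim_ definition above) =====
theorem lookup_answer_index_spec : Claim_unchanged_lookup_answer_index := by
  intro ans doc _ hD
  exact main_eq ans doc hD

theorem lookup_answer_index_changed : Claim_changed_lookup_answer_index := by
  unfold Claim_changed_lookup_answer_index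
  refine ⟨by decide, by decide, ?_, ?_, by decide⟩
  · rw [show pvDiffWitness_lookup_answer_index.1 = ([] : List String) from rfl,
        show pvDiffWitness_lookup_answer_index.2 = ([] : List String) from rfl]
    rw [lookup_answer_index, pvOuterA]
    norm_num
    rfl
  · rw [show pvDiffWitness_lookup_answer_index.1 = ([] : List String) from rfl,
        show pvDiffWitness_lookup_answer_index.2 = ([] : List String) from rfl]
    rw [altB_empty_pat]
    rfl

theorem lookup_answer_index_tight : Claim_exact_lookup_answer_index := by
  intro ans doc _ hD
  obtain ⟨h1, h2⟩ := hD; subst h1; subst h2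
  rw [altB_empty_pat, lookup_answer_index, pvOuterA]
  norm_num
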